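-- pv_equiv track=rewrite | github.com/h111359/kolko-ni-struva | src/py/kolko-ni-struva/etl/update_kolko_ni_struva.py | normalize_city_code
-- ===== SOURCE A (Python) =====
-- def normalize_city_code(code):
--     """
--     Normalize city codes (EKATTE codes) to 5-digit format:
--     - Remove everything after first 5 digits (e.g., "68134-01" -> "68134")
--     - Left-pad with zeros to 5 digits (e.g., "702" -> "00702")
--     - Return empty string if code is empty or invalid
--     """
--     if not code or not isinstance(code, str):
--         return ""
--
--     # Strip whitespace
--     code = code.strip()
--
--     # Extract first 5 digits (remove anything after hyphen or non-digit)
--     digits_only = ""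
--     for char in code:
--         if char.isdigit():
--             digits_only += char
--             if len(digits_only) == 5:
--                 break
--         elif digits_only:  # Stop at first non-digit after digits started
--             break
--
--     # Left-pad to 5 digits
--     if digits_only:
--         return digits_only.zfill(5)
--
--     return ""
-- ===== SOURCE B (Python) =====
-- def normalize_city_code(code):
--     if not code or not isinstance(code, str):
--         return ""
--     # mask every non-digit to a space, then whitespace-split: the words are
--     # exactly the maximal digit runs; the answer is the first one, capped at 5
--     masked = "".join(c if c.isdigit() else " " for c in code.strip())
--     runs = masked.split()
--     return runs[0][:5].zfill(5) if runs else ""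
-- ===== Notes on version B (the rewrite author's own statement) =====
-- stated objective: alternative
-- what changed: Replaces A's stateful accumulator scan with break conditions by a mask-then-split pipeline: every non-digit is rewritten to a space, str.split() yields the maximal digit runs, and the first run capped at 5 is zfill-ed.
import Mathlib
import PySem

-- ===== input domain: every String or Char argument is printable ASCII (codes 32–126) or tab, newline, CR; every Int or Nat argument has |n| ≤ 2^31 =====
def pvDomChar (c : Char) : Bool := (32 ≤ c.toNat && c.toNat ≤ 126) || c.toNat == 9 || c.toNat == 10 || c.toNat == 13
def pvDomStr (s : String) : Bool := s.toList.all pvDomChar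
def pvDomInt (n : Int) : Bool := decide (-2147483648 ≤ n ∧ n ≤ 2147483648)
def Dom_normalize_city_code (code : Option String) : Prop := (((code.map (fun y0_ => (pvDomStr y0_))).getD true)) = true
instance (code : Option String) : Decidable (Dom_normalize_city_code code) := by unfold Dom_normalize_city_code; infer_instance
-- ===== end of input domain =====

-- B replaces A's stateful accumulator scan by a mask-then-split pipeline: rewrite
-- every non-digit to a space, str.split() the result, and take the first word (a
-- maximal digit run) capped at 5 (alternative decomposition, same cost).

-- ===== PORT A =====
-- the for-loop over the characters with the digits_only accumulator and its two break conditions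
def pvLoopA (cs : List Char) (acc : List Char) : List Char :=
  match cs with
  | [] => acc
  | c :: rest =>
    if PySem.Chars.isdigit c then
      let acc' := acc ++ [c]
      if acc'.length = 5 then acc' else pvLoopA rest acc'
    else if acc ≠ [] then acc
    else pvLoopA rest acc

def normalize_city_code (code : Option String) : String :=
  match code with
  | none => ""
  | some s =>
    if s = "" then ""
    else
      let cs := PySem.Chars.strip s.toList
      let digits_only := pvLoopA cs []
      if digits_only ≠ [] then String.ofList (PySem.Chars.zfill digits_only 5)
      else ""

-- ===== PORT B =====
def normalize_city_code_alt (code : Option String) : String :=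
  match code with
  | none => ""
  | some s =>
    if s = "" then ""
    else
      let masked := (PySem.Chars.strip s.toList).map
        (fun c => if PySem.Chars.isdigit c then c else ' ')
      let runs := PySem.Chars.split₀ masked
      match runs with
      | [] => ""
      | w :: _ => String.ofList (PySem.Chars.zfill (w.take 5) 5)

-- ===== PRECONDITION & SPEC =====
def Spec_normalize_city_code (code : Option String) (out : String) : Prop := out = normalize_city_code_alt code
instance (code : Option String) (out : String) : Decidable (Spec_normalize_city_code code out) := by unfold Spec_normalize_city_code; infer_instance

-- ===== CLAIM =====
def Claim_equal_normalize_city_code : Prop := ∀ (code : Option String), Dom_normalize_city_code code → Spec_normalize_city_code code (normalize_city_code code)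

-- ===== LEMMAS AND PROOFS =====

-- A digit character is not whitespace.
theorem pv_digit_not_space (c : Char) (h : PySem.Chars.isdigit c = true) :
    PySem.Chars.isspace c = false := by
  simp only [PySem.Chars.isdigit, Bool.and_eq_true, decide_eq_true_eq] at h
  obtain ⟨h1, h2⟩ := h
  have hn1 : 48 ≤ c.toNat := h1
  have hn2 : c.toNat ≤ 57 := h2
  simp only [PySem.Chars.isspace]
  simp only [Bool.or_eq_false_iff, Bool.and_eq_false_iff, decide_eq_false_iff_not]
  omega

-- A-side: collecting phase — once a digit was seen, A's loop returns the run capped at 5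
theorem pvLoopA_collect (cs : List Char) (acc : List Char) (hne : acc ≠ [])
    (hlt : acc.length < 5) :
    pvLoopA cs acc = (acc ++ cs.takeWhile (fun c => PySem.Chars.isdigit c)).take 5 := by
  induction cs generalizing acc with
  | nil =>
    simp [pvLoopA, List.take_of_length_le (Nat.le_of_lt hlt)]
  | cons c rest ih =>
    by_cases hd : PySem.Chars.isdigit c
    · simp only [pvLoopA, hd, if_pos, List.takeWhile_cons_of_pos]
      by_cases h5 : (acc ++ [c]).length = 5
      · simp only [h5, if_pos]
        rw [show acc ++ c :: List.takeWhile (fun c => PySem.Chars.isdigit c) rest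
              = (acc ++ [c]) ++ List.takeWhile (fun c => PySem.Chars.isdigit c) rest by simp,
            List.take_append_of_le_length (by omega), List.take_of_length_le (by omega)]
      · have hlt' : (acc ++ [c]).length < 5 := by
          simp at h5 ⊢; omega
        simp only [h5, if_neg, not_false_iff]
        rw [ih (acc ++ [c]) (by simp) hlt']
        simp
    · have h1 : pvLoopA (c :: rest) acc = acc := by simp [pvLoopA, hd, hne]
      rw [h1, List.takeWhile_cons_of_neg (p := fun c => PySem.Chars.isdigit c) (by simp [hd])]
      simp [List.take_of_length_le (Nat.le_of_lt hlt)]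

-- A-side: A's loop computes the first digit run, capped at 5
theorem pvLoopA_eq (cs : List Char) :
    pvLoopA cs [] = ((cs.dropWhile (fun c => !PySem.Chars.isdigit c)).takeWhile
                      (fun c => PySem.Chars.isdigit c)).take 5 := by
  induction cs with
  | nil => simp [pvLoopA]
  | cons c rest ih =>
    by_cases hd : PySem.Chars.isdigit c
    · have h1 : pvLoopA (c :: rest) [] = pvLoopA rest [c] := by
        simp [pvLoopA, hd]
      rw [h1, pvLoopA_collect rest [c] (by simp) (by simp)]
      simp [hd, List.takeWhile_cons_of_pos]
    · have h1 : pvLoopA (c :: rest) [] = pvLoopA rest [] := by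
        simp [pvLoopA, hd]
      rw [h1, ih]
      simp [hd]

theorem pv_split_go_acc (ds cur : List Char) (acc : List (List Char)) :
    PySem.Chars.split₀.go ds cur acc = acc.reverse ++ PySem.Chars.split₀.go ds cur [] := by
  induction ds generalizing cur acc with
  | nil =>
    by_cases hc : cur.isEmpty
    · simp [PySem.Chars.split₀.go, hc]
    · simp [PySem.Chars.split₀.go, hc]
  | cons d rest ih =>
    by_cases hs : PySem.Chars.isspace d
    · by_cases hc : cur.isEmpty
      · simp only [PySem.Chars.split₀.go, hs, hc, if_pos]
        exact ih [] acc
      · simp only [PySem.Chars.split₀.go, hs, hc, if_pos, if_neg, Bool.false_eq_true,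
          not_false_iff]
        rw [ih [] (cur.reverse :: acc), ih [] [cur.reverse]]
        simp
    · simp only [PySem.Chars.split₀.go, hs, Bool.false_eq_true, if_neg, not_false_iff]
      exact ih (d :: cur) acc

-- B-side: collecting phase of split₀ on a digit/space list, current word nonempty
theorem pv_split_go_collect (ds cur : List Char)
    (hds : ∀ c ∈ ds, PySem.Chars.isdigit c = true ∨ c = ' ')
    (hcur : cur ≠ []) :
    (PySem.Chars.split₀.go ds cur []).head? =
      some (cur.reverse ++ ds.takeWhile (fun c => PySem.Chars.isdigit c)) := by
  induction ds generalizing cur with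
  | nil => simp [PySem.Chars.split₀.go, hcur]
  | cons d rest ih =>
    rcases hds d (by simp) with hd | hd
    · have hs : PySem.Chars.isspace d = false := pv_digit_not_space d hd
      simp only [PySem.Chars.split₀.go, hs, Bool.false_eq_true, if_neg, not_false_iff]
      rw [ih (d :: cur) (fun c hc => hds c (by simp [hc])) (by simp)]
      simp [hd, List.takeWhile_cons_of_pos]
    · subst hd
      have hs : PySem.Chars.isspace ' ' = true := by decide
      have hd' : PySem.Chars.isdigit ' ' = false := by decide
      simp only [PySem.Chars.split₀.go, hs, if_pos]
      rw [if_neg (by simpa using hcur), pv_split_go_acc]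
      simp [List.takeWhile_cons_of_neg, hd']

-- B-side: the first word of split₀ on a digit/space list is the first digit run
theorem pv_split_head (ds : List Char)
    (hds : ∀ c ∈ ds, PySem.Chars.isdigit c = true ∨ c = ' ') :
    (PySem.Chars.split₀ ds).head? =
      (fun r => if r = ([] : List Char) then none else some r)
        ((ds.dropWhile (fun c => !PySem.Chars.isdigit c)).takeWhile
          (fun c => PySem.Chars.isdigit c)) := by
  induction ds with
  | nil => simp [PySem.Chars.split₀, PySem.Chars.split₀.go]
  | cons d rest ih =>
    rcases hds d (by simp) with hd | hd
    · have hs : PySem.Chars.isspace d = false := pv_digit_not_space d hd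
      simp only [PySem.Chars.split₀, PySem.Chars.split₀.go, hs, Bool.false_eq_true, if_neg,
        not_false_iff]
      rw [pv_split_go_collect rest [d] (fun c hc => hds c (by simp [hc])) (by simp)]
      simp [hd, List.dropWhile_cons_of_neg, List.takeWhile_cons_of_pos]
    · subst hd
      have hs : PySem.Chars.isspace ' ' = true := by decide
      have hd' : PySem.Chars.isdigit ' ' = false := by decide
      have h1 : PySem.Chars.split₀ (' ' :: rest) = PySem.Chars.split₀ rest := by
        simp [PySem.Chars.split₀, PySem.Chars.split₀.go, hs]
      rw [h1, ih (fun c hc => hds c (by simp [hc]))]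
      simp [List.dropWhile_cons_of_pos, hd']

-- masking commutes with the first-digit-run extraction
theorem pv_mask_run (cs : List Char) :
    (((cs.map (fun c => if PySem.Chars.isdigit c then c else ' ')).dropWhile
        (fun c => !PySem.Chars.isdigit c)).takeWhile (fun c => PySem.Chars.isdigit c)) =
    ((cs.dropWhile (fun c => !PySem.Chars.isdigit c)).takeWhile
        (fun c => PySem.Chars.isdigit c)) := by
  have hpm : ∀ c, PySem.Chars.isdigit (if PySem.Chars.isdigit c then c else ' ')
      = PySem.Chars.isdigit c := by
    intro c
    by_cases h : PySem.Chars.isdigit c <;> simp [h] <;> decide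
  rw [List.dropWhile_map, List.takeWhile_map]
  have h1 : (fun c => !PySem.Chars.isdigit c) ∘
      (fun c => if PySem.Chars.isdigit c then c else ' ')
      = fun c => !PySem.Chars.isdigit c := by
    funext c; simp [hpm c]
  have h2 : (fun c => PySem.Chars.isdigit c) ∘
      (fun c => if PySem.Chars.isdigit c then c else ' ')
      = fun c => PySem.Chars.isdigit c := by
    funext c; simp [hpm c]
  rw [h1, h2]
  conv_rhs => rw [← List.map_id ((cs.dropWhile (fun c => !PySem.Chars.isdigit c)).takeWhile
      (fun c => PySem.Chars.isdigit c))]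
  apply List.map_congr_left
  intro c hc
  have := List.mem_takeWhile_imp hc
  simp at this
  simp [this]

-- ===== VERDICT =====
theorem normalize_city_code_spec : Claim_equal_normalize_city_code := by
  intro code _
  unfold Spec_normalize_city_code normalize_city_code normalize_city_code_alt
  match code with
  | none => rfl
  | some s =>
    by_cases hs : s = ""
    · simp [hs]
    · simp only [hs, if_neg, not_false_iff]
      set cs := PySem.Chars.strip s.toList with hcs
      have hmask : ∀ c ∈ cs.map (fun c => if PySem.Chars.isdigit c then c else ' '),
          PySem.Chars.isdigit c = true ∨ c = ' ' := by
        intro c hc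
        rcases List.mem_map.mp hc with ⟨x, _, hx⟩
        by_cases hxd : PySem.Chars.isdigit x
        · left; rw [← hx]; simp [hxd]
        · right; rw [← hx]; simp [hxd]
      rw [pvLoopA_eq]
      have hb := pv_split_head _ hmask
      rw [pv_mask_run cs] at hb
      set r := (cs.dropWhile (fun c => !PySem.Chars.isdigit c)).takeWhile
        (fun c => PySem.Chars.isdigit c) with hr
      rcases List.eq_nil_or_concat' r with hrn | _
      · have : (PySem.Chars.split₀ (cs.map
            (fun c => if PySem.Chars.isdigit c then c else ' '))).head? = none := by
          rw [hb, hrn]; simp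
        rcases hsp : PySem.Chars.split₀ (cs.map
            (fun c => if PySem.Chars.isdigit c then c else ' ')) with _ | ⟨w, ws⟩
        · simp [hrn]
        · rw [hsp] at this; simp at this
      case _ h =>
        rcases h with ⟨w0, c0, hrw⟩
        have hrne : r ≠ [] := by rw [hrw]; simp
        have : (PySem.Chars.split₀ (cs.map
            (fun c => if PySem.Chars.isdigit c then c else ' '))).head? = some r := by
          rw [hb]; simp [hrne]
        rcases hsp : PySem.Chars.split₀ (cs.map
            (fun c => if PySem.Chars.isdigit c then c else ' ')) with _ | ⟨w, ws⟩
        · rw [hsp] at this; simp at this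
        · rw [hsp] at this; simp at this
          subst this
          have : r.take 5 ≠ [] := by rw [hrw]; rcases w0 with _ | ⟨a, t⟩ <;> simp
          simp [this]
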